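-- pv_equiv track=rewrite | github.com/isi-nlp/saral | tools/dataprep/unsplitter.py | merge_doc
-- ===== SOURCE A (Python) =====
-- def merge_doc(orig, split, inp, doc_id=None):
--
--     orig_wc = sum([len(ws) for sid, ws in orig])
--     split_wc = sum([len(ws) for sid, ws in orig])
--     if orig_wc != split_wc:
--         raise Exception("Alignment not possible, DOCID : %s" % doc_id)
--     if len(split) != len(inp):
--         raise Exception("Alignment not possible, DOCID : %s, splits:%d, input:%d" % (doc_id, len(split), len(inp)))
--     # FIXME: merge
--     oi, si = 0, 0
--     res = []
--     while oi < len(orig) and si < len(split):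
--         buff = []
--         o_id, o_toks = orig[oi]
--         i = si
--         while len(buff) < len(o_toks) and i < len(split) and buff != o_toks:
--             buff.extend(split[i][1])
--             i += 1
--         if buff == o_toks:
--             res_toks = [tok for _, toks in inp[si:i] for tok in toks]
--             res.append((o_id, ' '.join(res_toks)))
--             oi += 1 # go to next
--             si = i  # jump to next
--         else:
--             raise Exception('Cant join doc %s :: SRC: %s, SRCSPLIT:%s' % (doc_id, orig[oi], buff))
--
--     return res
-- ===== SOURCE B (Python) =====
-- def merge_doc(orig, split, inp, doc_id=None):
--     if len(split) != len(inp):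
--         raise Exception("Alignment not possible, DOCID : %s, splits:%d, input:%d" % (doc_id, len(split), len(inp)))
--     n = len(split)
--     # Flatten all split tokens once and record each split sentence's start offset.
--     flat = []
--     starts = []
--     for _, toks in split:
--         starts.append(len(flat))
--         flat.extend(toks)
--     total = len(flat)
--
--     def boundary(j):
--         return starts[j] if j < n else total
--
--     res = []
--     si, pos = 0, 0
--     for o_id, o_toks in orig:
--         if si >= n:
--             break
--         j = si
--         while j < n and boundary(j) - pos < len(o_toks):
--             j += 1
--         end = boundary(j)
--         if flat[pos:end] != o_toks:
--             raise Exception('Cant join doc %s :: SRC: %s, SRCSPLIT:%s' % (doc_id, (o_id, o_toks), flat[pos:end]))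
--         out = [tok for _, toks in inp[si:j] for tok in toks]
--         res.append((o_id, ' '.join(out)))
--         si, pos = j, end
--     return res
-- ===== Notes on version B (the rewrite author's own statement) =====
-- stated objective: alternative
-- what changed: B flattens all split-sentence tokens once and records each chunk's start offset, then matches each original sentence by advancing an offset pointer and doing a single slice comparison, instead of A's per-sentence re-accumulation of a buffer that is compared against the whole target token list on every inner iteration.
-- outside the precondition, e.g. on merge_doc([(1, ['a'])], [(1, ['a'])], [], None): A raises Exception, B raises Exception; on merge_doc([(1, ['a'])], [(1, ['b'])], [(1, ['x'])], None): A raises Exception, B raises Exception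
import Mathlib
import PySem

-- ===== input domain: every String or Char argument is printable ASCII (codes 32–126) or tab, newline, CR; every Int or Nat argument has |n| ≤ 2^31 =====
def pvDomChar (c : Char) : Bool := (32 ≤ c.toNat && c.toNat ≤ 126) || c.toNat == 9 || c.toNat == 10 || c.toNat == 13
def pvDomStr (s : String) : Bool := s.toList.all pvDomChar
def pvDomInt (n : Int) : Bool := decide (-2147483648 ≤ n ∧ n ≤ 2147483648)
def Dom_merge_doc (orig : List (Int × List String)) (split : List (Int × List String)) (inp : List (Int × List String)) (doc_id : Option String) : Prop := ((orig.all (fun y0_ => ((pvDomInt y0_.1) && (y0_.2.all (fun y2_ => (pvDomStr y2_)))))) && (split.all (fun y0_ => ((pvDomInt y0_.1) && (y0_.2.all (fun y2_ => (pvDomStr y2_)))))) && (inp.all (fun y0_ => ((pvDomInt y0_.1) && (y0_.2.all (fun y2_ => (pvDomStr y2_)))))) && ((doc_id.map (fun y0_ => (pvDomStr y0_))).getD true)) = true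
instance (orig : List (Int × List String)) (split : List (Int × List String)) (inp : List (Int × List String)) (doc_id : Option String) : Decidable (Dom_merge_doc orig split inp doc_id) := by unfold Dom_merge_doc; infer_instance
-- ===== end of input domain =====

-- B flattens the split tokens once and records each chunk's start offset, so each original
-- sentence is matched by one slice comparison instead of A's repeated whole-list comparisons
-- inside the accumulation loop (objective: alternative algorithm, same measured cost).
-- Where the Python A raises, its port returns the result accumulated so far; Pre_ excludes those inputs.

-- ===== PORT A =====
-- inner while: extend buff from split[i] while len(buff) < len(o_toks) and i < len(split) and buff != o_toks
def pvInnerA (o_toks : List String) (split : List (Int × List String)) (buff : List String) (i : Nat) :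
    List String × Nat :=
  if h : buff.length < o_toks.length ∧ i < split.length ∧ buff ≠ o_toks then
    pvInnerA o_toks split (buff ++ (split.getD i (0, [])).2) (i + 1)
  else (buff, i)
termination_by split.length - i
decreasing_by omega

-- outer while over oi, si
def pvOuterA (orig split inp : List (Int × List String)) (oi si : Nat)
    (res : List (Int × String)) : List (Int × String) :=
  if h : oi < orig.length ∧ si < split.length then
    let p := orig.getD oi (0, [])
    let bi := pvInnerA p.2 split [] si
    if bi.1 = p.2 then
      let res_toks := (PySem.List.slice inp (some (si : Int)) (some (bi.2 : Int))).flatMap (·.2)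
      pvOuterA orig split inp (oi + 1) bi.2 (res ++ [(p.1, PySem.Str.join " " res_toks)])
    else res  -- Python raises here (excluded by Pre_)
  else res
termination_by orig.length - oi
decreasing_by omega

def merge_doc (orig : List (Int × List String)) (split : List (Int × List String)) (inp : List (Int × List String)) (doc_id : Option String) : List (Int × String) :=
  let orig_wc : Nat := (orig.map (fun p => p.2.length)).sum
  let split_wc : Nat := (orig.map (fun p => p.2.length)).sum  -- A sums over orig twice (its own code)
  if orig_wc ≠ split_wc then []  -- Python raises (unreachable)
  else if split.length ≠ inp.length then []  -- Python raises (excluded by Pre_)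
  else pvOuterA orig split inp 0 0 []

-- ===== PORT B =====
-- starts[j] = offset of split chunk j inside the flattened token list; boundary(j) as in Source B
def pvBoundary (starts : List Nat) (total n j : Nat) : Nat :=
  if j < n then starts.getD j 0 else total

-- while j < n and boundary(j) - pos < len(o_toks): j += 1
def pvScanB (starts : List Nat) (total n pos target j : Nat) : Nat :=
  if h : j < n ∧ pvBoundary starts total n j - pos < target then
    pvScanB starts total n pos target (j + 1)
  else j
termination_by n - j
decreasing_by omega

def pvLoopB (split inp : List (Int × List String)) (flat : List String) (starts : List Nat)
    (n : Nat) : List (Int × List String) → Nat → Nat → List (Int × String) → List (Int × String)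
  | [], _, _, res => res
  | (o_id, o_toks) :: os, si, pos, res =>
    if n ≤ si then res
    else
      let j := pvScanB starts flat.length n pos o_toks.length si
      let endp := pvBoundary starts flat.length n j
      let seg := PySem.List.slice flat (some (pos : Int)) (some (endp : Int))
      if seg = o_toks then
        let out := (PySem.List.slice inp (some (si : Int)) (some (j : Int))).flatMap (·.2)
        pvLoopB split inp flat starts n os j endp (res ++ [(o_id, PySem.Str.join " " out)])
      else res  -- Python raises here (excluded by Pre_)

def merge_doc_alt (orig : List (Int × List String)) (split : List (Int × List String)) (inp : List (Int × List String)) (doc_id : Option String) : List (Int × String) :=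
  if split.length ≠ inp.length then []  -- Python raises (excluded by Pre_)
  else
    let fs := split.foldl (fun fs p => (fs.1 ++ p.2, fs.2 ++ [fs.1.length]))
      (([] : List String), ([] : List Nat))
    pvLoopB split inp fs.1 fs.2 split.length orig 0 0 []

-- ===== PRECONDITION & SPEC =====
-- Pre_ admits exactly the inputs on which the Python A returns normally: equal lengths of
-- split and inp, and the greedy length-driven grouping of split chunks reconstructs each
-- original sentence it reaches (otherwise A raises 'Cant join').
def pvChop (t : Nat) : List (List String) → List (List String) × List (List String)
  | [] => ([], [])
  | s :: rest =>
    if t = 0 then ([], s :: rest)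
    else
      let p := pvChop (t - s.length) rest
      (s :: p.1, p.2)

def pvCanAlign : List (List String) → List (List String) → Bool
  | [], _ => true
  | _ :: _, [] => true
  | o :: os, s :: ss =>
    let p := pvChop o.length (s :: ss)
    (p.1.flatten == o) && pvCanAlign os p.2

def Pre_merge_doc (orig : List (Int × List String)) (split : List (Int × List String)) (inp : List (Int × List String)) (doc_id : Option String) : Prop :=
  split.length = inp.length ∧ pvCanAlign (orig.map (·.2)) (split.map (·.2)) = true

instance (orig : List (Int × List String)) (split : List (Int × List String)) (inp : List (Int × List String)) (doc_id : Option String) : Decidable (Pre_merge_doc orig split inp doc_id) := by unfold Pre_merge_doc; infer_instance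

def pvWitness_merge_doc : (List (Int × List String)) × (List (Int × List String)) × (List (Int × List String)) × Option String :=
  ([(1, ["a", "b"]), (2, ["c"])], [(1, ["a"]), (2, ["b"]), (3, ["c"])],
   [(1, ["x"]), (2, ["y"]), (3, ["z"])], none)

def Spec_merge_doc (orig : List (Int × List String)) (split : List (Int × List String)) (inp : List (Int × List String)) (doc_id : Option String) (out : List (Int × String)) : Prop := out = merge_doc_alt orig split inp doc_id
instance (orig : List (Int × List String)) (split : List (Int × List String)) (inp : List (Int × List String)) (doc_id : Option String) (out : List (Int × String)) : Decidable (Spec_merge_doc orig split inp doc_id out) := by unfold Spec_merge_doc; infer_instance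

-- ===== CLAIM (what is proved, stated in full; the proofs are below) =====
def Claim_equal_merge_doc : Prop := ∀ (orig : List (Int × List String)) (split : List (Int × List String)) (inp : List (Int × List String)) (doc_id : Option String), Dom_merge_doc orig split inp doc_id → Pre_merge_doc orig split inp doc_id → Spec_merge_doc orig split inp doc_id (merge_doc orig split inp doc_id)


-- ===== LEMMAS AND PROOFS =====

-- flatten of the token lists of a list of (id, tokens) pairs
def pvL (ss : List (Int × List String)) : List String := ss.flatMap (·.2)

-- number of tokens in the first j chunks
def pvPref (split : List (Int × List String)) (j : Nat) : Nat := (pvL (split.take j)).length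

-- tokens of chunks si..j-1
def pvSeg (split : List (Int × List String)) (si j : Nat) : List String :=
  pvL ((split.drop si).take (j - si))

theorem pvL_append (xs ys : List (Int × List String)) : pvL (xs ++ ys) = pvL xs ++ pvL ys := by
  simp [pvL]

theorem pvFold_spec (split : List (Int × List String)) (fl : List String) (st : List Nat) :
    split.foldl (fun fs p => (fs.1 ++ p.2, fs.2 ++ [fs.1.length])) (fl, st)
      = (fl ++ pvL split,
         st ++ (List.range split.length).map (fun j => fl.length + pvPref split j)) := by
  induction split generalizing fl st with
  | nil => simp [pvL, pvPref]
  | cons p rest ih =>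
    simp only [List.foldl_cons, ih, Prod.mk.injEq]
    constructor
    · simp [pvL]
    · have h0 : pvPref (p :: rest) 0 = 0 := by simp [pvPref, pvL]
      have hs : ∀ j : Nat, pvPref (p :: rest) (j + 1) = p.2.length + pvPref rest j := by
        intro j; simp [pvPref, pvL]
      rw [List.length_cons, List.range_succ_eq_map, List.map_cons, List.map_map, h0]
      simp only [Function.comp_def, hs, List.length_append, List.append_assoc,
        List.singleton_append]
      simp [Nat.add_assoc]

theorem pvFold_spec' (split : List (Int × List String)) :
    split.foldl (fun fs p => (fs.1 ++ p.2, fs.2 ++ [fs.1.length]))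
        (([] : List String), ([] : List Nat))
      = (pvL split, (List.range split.length).map (pvPref split)) := by
  rw [pvFold_spec]; simp

theorem pvTake_eq (split : List (Int × List String)) {si i : Nat} (h : si ≤ i) :
    split.take i = split.take si ++ (split.drop si).take (i - si) := by
  rw [← List.take_add]
  congr 1; omega

theorem pvSeg_len (split : List (Int × List String)) {si i : Nat} (h : si ≤ i) :
    (pvSeg split si i).length = pvPref split i - pvPref split si := by
  have := pvTake_eq split h
  simp only [pvPref, this, pvL_append, List.length_append, pvSeg]
  omega

theorem pvSeg_self (split : List (Int × List String)) (si : Nat) : pvSeg split si si = [] := by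
  simp [pvSeg, pvL]

theorem pvSeg_succ (split : List (Int × List String)) {si i : Nat} (h1 : si ≤ i)
    (h2 : i < split.length) :
    pvSeg split si (i + 1) = pvSeg split si i ++ (split.getD i (0, [])).2 := by
  have hk : i + 1 - si = (i - si) + 1 := by omega
  have hlt : i - si < (split.drop si).length := by simp; omega
  rw [pvSeg, hk, List.take_add_one]
  have : (split.drop si)[i - si]? = some split[i] := by
    rw [List.getElem?_drop]
    rw [List.getElem?_eq_getElem (by omega)]
    congr 1; congr 1; omega
  rw [this]
  simp [pvSeg, pvL, List.getD_eq_getElem?_getD, List.getElem?_eq_getElem h2]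

theorem pvBoundary_eq (split : List (Int × List String)) (j : Nat) :
    pvBoundary ((List.range split.length).map (pvPref split)) (pvL split).length
        split.length j = pvPref split (min j split.length) := by
  unfold pvBoundary
  split_ifs with h
  · rw [List.getD_eq_getElem _ _ (by simpa using h)]
    simp [Nat.le_of_lt h]
  · have : min j split.length = split.length := by omega
    rw [this]
    simp [pvPref]

theorem pvSlice_seg (split : List (Int × List String)) {si j : Nat} (h1 : si ≤ j)
    (h2 : j ≤ split.length) :
    PySem.List.slice (pvL split) (some ((pvPref split si : Nat) : Int))
        (some ((pvPref split j : Nat) : Int)) = pvSeg split si j := by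
  rw [PySem.List.slice_natCast]
  have hsplit : pvL split = pvL (split.take si) ++ pvL (split.drop si) := by
    rw [← pvL_append, List.take_append_drop]
  have hdrop : (pvL split).drop (pvPref split si) = pvL (split.drop si) := by
    rw [hsplit]; exact List.drop_left' rfl
  have hsplit2 : pvL (split.drop si) = pvSeg split si j ++ pvL (split.drop j) := by
    have h := List.take_append_drop (j - si) (split.drop si)
    rw [List.drop_drop, Nat.add_sub_cancel' h1] at h
    conv_lhs => rw [← h]
    rw [pvL_append, pvSeg]
  rw [hdrop, hsplit2, List.take_left' (by rw [pvSeg_len split h1])]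

theorem pvInner_scan (split : List (Int × List String)) (o : List String) (si : Nat) :
    ∀ k i, split.length - i = k → si ≤ i → i ≤ split.length →
      si ≤ pvScanB ((List.range split.length).map (pvPref split)) (pvL split).length
            split.length (pvPref split si) o.length i ∧
      pvScanB ((List.range split.length).map (pvPref split)) (pvL split).length
            split.length (pvPref split si) o.length i ≤ split.length ∧
      pvInnerA o split (pvSeg split si i) i
        = (pvSeg split si (pvScanB ((List.range split.length).map (pvPref split))
            (pvL split).length split.length (pvPref split si) o.length i),
           pvScanB ((List.range split.length).map (pvPref split)) (pvL split).length
            split.length (pvPref split si) o.length i) := by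
  intro k
  induction k with
  | zero =>
    intro i hk h1 h2
    have hi : i = split.length := by omega
    rw [pvScanB, dif_neg (by rintro ⟨h, -⟩; omega)]
    rw [pvInnerA, dif_neg (by rintro ⟨-, h, -⟩; omega)]
    exact ⟨h1, h2, rfl⟩
  | succ k ih =>
    intro i hk h1 h2
    have hi : i < split.length := by omega
    have hb : pvBoundary ((List.range split.length).map (pvPref split)) (pvL split).length
        split.length i = pvPref split i := by
      rw [pvBoundary_eq]; congr 1; omega
    have hlen : (pvSeg split si i).length = pvPref split i - pvPref split si :=
      pvSeg_len split h1
    by_cases hc : pvPref split i - pvPref split si < o.length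
    · rw [pvScanB, dif_pos ⟨hi, by rw [hb]; exact hc⟩]
      rw [pvInnerA, dif_pos ⟨by omega, hi, by intro h; rw [h] at hlen; omega⟩]
      rw [← pvSeg_succ split h1 hi]
      exact ⟨by have := (ih (i + 1) (by omega) (by omega) (by omega)).1; omega,
             (ih (i + 1) (by omega) (by omega) (by omega)).2.1,
             (ih (i + 1) (by omega) (by omega) (by omega)).2.2⟩
    · rw [pvScanB, dif_neg (by rintro ⟨-, h⟩; rw [hb] at h; omega)]
      rw [pvInnerA, dif_neg (by rintro ⟨h, -, -⟩; omega)]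
      exact ⟨h1, by omega, rfl⟩

theorem pvOuter_loop (split inp : List (Int × List String)) (orig : List (Int × List String)) :
    ∀ k oi si res, orig.length - oi = k → si ≤ split.length →
      pvOuterA orig split inp oi si res
        = pvLoopB split inp (pvL split) ((List.range split.length).map (pvPref split))
            split.length (orig.drop oi) si (pvPref split si) res := by
  intro k
  induction k with
  | zero =>
    intro oi si res hk hsi
    have : orig.drop oi = [] := List.drop_eq_nil_of_le (by omega)
    rw [this, pvOuterA, dif_neg (by rintro ⟨h, -⟩; omega)]
    rfl
  | succ k ih =>
    intro oi si res hk hsi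
    have hoi : oi < orig.length := by omega
    have hget : orig.getD oi (0, []) = orig[oi] := List.getD_eq_getElem orig (0, []) hoi
    have hdropo : orig.drop oi = orig[oi] :: orig.drop (oi + 1) := List.drop_eq_getElem_cons hoi
    rw [hdropo]
    rw [pvOuterA]
    by_cases hsin : si < split.length
    · rw [dif_pos ⟨hoi, hsin⟩, hget]
      generalize hp : orig[oi] = p
      obtain ⟨o_id, o_toks⟩ := p
      obtain ⟨hle1, hle2, hinner⟩ := pvInner_scan split o_toks si (split.length - si) si rfl
        le_rfl (le_of_lt hsin)
      rw [pvSeg_self split si] at hinner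
      set j := pvScanB ((List.range split.length).map (pvPref split)) (pvL split).length
        split.length (pvPref split si) o_toks.length si with hj
      have hbnd : pvBoundary ((List.range split.length).map (pvPref split))
          (pvL split).length split.length j = pvPref split j := by
        rw [pvBoundary_eq]; congr 1; omega
      rw [pvLoopB.eq_def]
      simp only [← hj, hinner, if_neg (by omega : ¬ split.length ≤ si), hbnd,
        pvSlice_seg split hle1 hle2]
      by_cases heq : pvSeg split si j = o_toks
      · rw [if_pos heq, if_pos heq]
        exact ih (oi + 1) j _ (by omega) hle2
      · rw [if_neg heq, if_neg heq]
    · rw [dif_neg (by rintro ⟨-, h⟩; omega)]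
      rw [pvLoopB.eq_def]
      generalize orig[oi] = p
      obtain ⟨o_id, o_toks⟩ := p
      simp [if_pos (by omega : split.length ≤ si)]

theorem merge_doc_ports_eq (orig split inp : List (Int × List String)) (doc_id : Option String) :
    merge_doc orig split inp doc_id = merge_doc_alt orig split inp doc_id := by
  unfold merge_doc merge_doc_alt
  rw [if_neg (by simp)]
  by_cases hlen : split.length ≠ inp.length
  · rw [if_pos hlen, if_pos hlen]
  · rw [if_neg hlen, if_neg hlen]
    simp only [pvFold_spec']
    have h0 : pvPref split 0 = 0 := by simp [pvPref, pvL]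
    have := pvOuter_loop split inp orig orig.length 0 0 [] (by omega) (by omega)
    rw [h0] at this
    simpa using this

theorem pvWitness_ok :
    Dom_merge_doc pvWitness_merge_doc.1 pvWitness_merge_doc.2.1 pvWitness_merge_doc.2.2.1 pvWitness_merge_doc.2.2.2 ∧
    Pre_merge_doc pvWitness_merge_doc.1 pvWitness_merge_doc.2.1 pvWitness_merge_doc.2.2.1 pvWitness_merge_doc.2.2.2 := by
  decide

-- ===== VERDICT (by name: the statement is the Claim_ definition above) =====
theorem merge_doc_spec : Claim_equal_merge_doc := by
  intro orig split inp doc_id _ _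
  unfold Spec_merge_doc
  exact merge_doc_ports_eq orig split inp doc_id
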